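-- pv_equiv track=rewrite | github.com/Lee-Hui-Je/goldew | controller/risk.py | generate_summary_and_actions
-- ===== SOURCE A (Python) =====
-- def generate_summary_and_actions(deductions, warnings):
--     summary_parts = set()
--     actions = set()
--
--     if not deductions:
--         summary = "등기부등본 분석 결과, 특이 위험 요인은 발견되지 않았습니다."
--         actions.add("등기부등본의 변동 여부를 주기적으로 확인하세요.")
--         return summary, list(actions), warnings
--
--     for d in deductions:
--         reason = d["reason"]
--
--         if "근저당권" in reason and "초과" in reason:
--             summary_parts.add("1순위로 설정된 근저당권의 채권최고액이 보증금을 초과합니다. 이는 경매 시 보증금이 전액 회수되지 않을 가능성을 의미합니다.")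
--             actions.update([
--                 "보증보험 가입 가능 여부 확인",
--                 "등기부등본상 채권최고액 및 설정 순위 확인"
--             ])
--
--         elif "가압류" in reason:
--             summary_parts.add("두 건 이상의 가압류가 발견되어 채권자 간 우선순위 경합이 예상되며, 이는 보증금 회수에 불리하게 작용할 수 있습니다.")
--             actions.update([
--                 "가압류 채권자 목록 확인",
--                 "가압류 해제 가능성 및 말소 여부 확인"
--             ])
--
--         elif "압류" in reason:
--             summary_parts.add("압류가 등기되어 있으며 말소되지 않았습니다. 이는 세금 체납 또는 법적 분쟁과 연관되어 있을 수 있습니다.")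
--             actions.add("채권자와 협의 및 압류 해제 요청 가능 여부 검토")
--
--         elif "소유권이전" in reason:
--             summary_parts.add("최근 2년 이내에 소유권이 이전되었습니다. 이는 투자 목적 매도 또는 명의 신뢰도 저하 요인일 수 있습니다.")
--             actions.add("이전 소유자와의 관계 및 명의 변동 사유 확인")
--
--         elif "불일치" in reason:
--             summary_parts.add("입력한 임대인 정보와 등기부등본에 기재된 실제 소유자가 일치하지 않습니다. 대리인 계약일 경우 위임장 확인이 필요합니다.")
--             actions.add("계약 상대방의 실소유자 여부 확인")
--
--         elif "계약일" in reason and "이후" in reason: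
--             summary_parts.add("계약일 이후에 추가된 권리가 발견되어, 선순위 권리로 인해 보증금 보호가 어려울 수 있습니다.")
--             actions.add("계약 체결일과 등기 날짜 비교 검토")
--
--         elif "공동담보" in reason:
--             summary_parts.add("본 부동산은 다른 채무의 담보로도 활용되고 있어, 경매 시 채권자 분배 우선순위에서 밀릴 수 있습니다.")
--             actions.add("공동담보 부동산 전체 목록과 채권 범위 확인")
--
--         elif "장기 미말소" in reason:
--             summary_parts.add("10년 이상 된 권리가 말소되지 않고 남아 있어 등기 정보의 최신성이 떨어질 수 있습니다.")
--             actions.add("등기부 권리 말소청구 가능 여부 확인")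
--
--         elif "지상권" in reason:
--             summary_parts.add("지상권이 설정된 부동산은 사용·수익에 제한이 있어 거주나 재임대에 제약이 있을 수 있습니다.")
--             actions.add("지상권 설정 범위 및 존속기간 확인")
--
--         elif "경매" in reason:
--             summary_parts.add("해당 부동산은 과거 경매 절차가 개시된 이력이 있어, 권리관계에 대한 면밀한 검토가 필요합니다.")
--             actions.add("과거 경매 사유 및 낙찰 여부 확인")
--
--         else:
--             summary_parts.add(reason)
--             actions.add("상세 내용 확인 필요")
--
--     summary_text = ""
--
--     if warnings:
--         warning_block = "⚠️[주의] 아래 항목은 입력 정보가 없어 분석에서 제외되었습니다:\n"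
--         warning_block += "\n".join(warnings)
--         summary_text += warning_block + "\n\n"
--
--
--     if summary_parts:
--         summary_text += "[위험 요인]\n"
--         summary_text += "\n".join(f"• {s}" for s in sorted(summary_parts))
--
--     return summary_text, sorted(actions), warnings
-- ===== SOURCE B (Python) =====
-- _FALLBACK_ACTION = "상세 내용 확인 필요"
--
-- _RULES = [
--     (lambda r: "근저당권" in r and "초과" in r,
--      "1순위로 설정된 근저당권의 채권최고액이 보증금을 초과합니다. 이는 경매 시 보증금이 전액 회수되지 않을 가능성을 의미합니다.",
--      ["보증보험 가입 가능 여부 확인", "등기부등본상 채권최고액 및 설정 순위 확인"]),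
--     (lambda r: "가압류" in r,
--      "두 건 이상의 가압류가 발견되어 채권자 간 우선순위 경합이 예상되며, 이는 보증금 회수에 불리하게 작용할 수 있습니다.",
--      ["가압류 채권자 목록 확인", "가압류 해제 가능성 및 말소 여부 확인"]),
--     (lambda r: "압류" in r,
--      "압류가 등기되어 있으며 말소되지 않았습니다. 이는 세금 체납 또는 법적 분쟁과 연관되어 있을 수 있습니다.",
--      ["채권자와 협의 및 압류 해제 요청 가능 여부 검토"]),
--     (lambda r: "소유권이전" in r,
--      "최근 2년 이내에 소유권이 이전되었습니다. 이는 투자 목적 매도 또는 명의 신뢰도 저하 요인일 수 있습니다.",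
--      ["이전 소유자와의 관계 및 명의 변동 사유 확인"]),
--     (lambda r: "불일치" in r,
--      "입력한 임대인 정보와 등기부등본에 기재된 실제 소유자가 일치하지 않습니다. 대리인 계약일 경우 위임장 확인이 필요합니다.",
--      ["계약 상대방의 실소유자 여부 확인"]),
--     (lambda r: "계약일" in r and "이후" in r,
--      "계약일 이후에 추가된 권리가 발견되어, 선순위 권리로 인해 보증금 보호가 어려울 수 있습니다.",
--      ["계약 체결일과 등기 날짜 비교 검토"]),
--     (lambda r: "공동담보" in r,
--      "본 부동산은 다른 채무의 담보로도 활용되고 있어, 경매 시 채권자 분배 우선순위에서 밀릴 수 있습니다.",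
--      ["공동담보 부동산 전체 목록과 채권 범위 확인"]),
--     (lambda r: "장기 미말소" in r,
--      "10년 이상 된 권리가 말소되지 않고 남아 있어 등기 정보의 최신성이 떨어질 수 있습니다.",
--      ["등기부 권리 말소청구 가능 여부 확인"]),
--     (lambda r: "지상권" in r,
--      "지상권이 설정된 부동산은 사용·수익에 제한이 있어 거주나 재임대에 제약이 있을 수 있습니다.",
--      ["지상권 설정 범위 및 존속기간 확인"]),
--     (lambda r: "경매" in r,
--      "해당 부동산은 과거 경매 절차가 개시된 이력이 있어, 권리관계에 대한 면밀한 검토가 필요합니다.",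
--      ["과거 경매 사유 및 낙찰 여부 확인"]),
-- ]
--
--
-- def generate_summary_and_actions(deductions, warnings):
--     if not deductions:
--         return ("등기부등본 분석 결과, 특이 위험 요인은 발견되지 않았습니다.",
--                 ["등기부등본의 변동 여부를 주기적으로 확인하세요."],
--                 warnings)
--
--     # Rule-major sieve: each rule consumes (filters out) the reasons it matches;
--     # a rule fires if it matched at least one still-unconsumed reason.  Earlier
--     # rules consume first, so compound/priority semantics are preserved, and
--     # because the outputs are deduplicated and sorted, rule-major order is
--     # equivalent to A's deduction-major order.
--     parts = set()
--     actions = set()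
--     remaining = [d["reason"] for d in deductions]
--     for pred, sentence, acts in _RULES:
--         matched = [r for r in remaining if pred(r)]
--         if matched:
--             parts.add(sentence)
--             actions.update(acts)
--         remaining = [r for r in remaining if not pred(r)]
--     for r in remaining:
--         parts.add(r)
--         actions.add(_FALLBACK_ACTION)
--
--     header = ""
--     if warnings:
--         header = ("⚠️[주의] 아래 항목은 입력 정보가 없어 분석에서 제외되었습니다:\n"
--                   + "\n".join(warnings) + "\n\n")
--
--     body = "[위험 요인]\n" + "\n".join("• " + s for s in sorted(parts))
--     return header + body, sorted(actions), warnings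
-- ===== Notes on version B (the rewrite author's own statement) =====
-- stated objective: alternative
-- what changed: A classifies deduction-major (one if/elif cascade per deduction, sets built incrementally); B is a rule-major sieve: it extracts the reason list once, then each rule filters the reasons it matches out of a shrinking pool and fires at most once, leftovers getting the fallback; order-independence of the deduplicated, sorted outputs makes the two traversals equivalent.
import Mathlib
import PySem

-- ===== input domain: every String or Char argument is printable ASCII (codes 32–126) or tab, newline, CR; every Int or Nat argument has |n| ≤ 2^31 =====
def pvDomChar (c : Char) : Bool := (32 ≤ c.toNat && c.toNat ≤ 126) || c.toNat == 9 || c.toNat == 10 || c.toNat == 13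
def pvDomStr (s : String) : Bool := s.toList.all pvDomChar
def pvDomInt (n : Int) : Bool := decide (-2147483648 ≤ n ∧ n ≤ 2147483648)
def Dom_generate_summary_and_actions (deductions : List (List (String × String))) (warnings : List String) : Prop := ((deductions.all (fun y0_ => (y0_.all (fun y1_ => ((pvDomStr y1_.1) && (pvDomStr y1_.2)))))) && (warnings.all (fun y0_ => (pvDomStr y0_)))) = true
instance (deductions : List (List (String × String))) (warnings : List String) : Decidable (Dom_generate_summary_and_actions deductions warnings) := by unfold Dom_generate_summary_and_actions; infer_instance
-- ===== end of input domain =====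

-- B replaces A's deduction-major if/elif pass by a rule-major sieve: each rule filters the
-- reasons it matches out of a shrinking pool and fires once if it caught any; leftovers get
-- the fallback (objective: alternative). Return-value equivalence; neither version mutates.

-- ===== PORT A =====
-- loop body of A's 'for d in deductions': (summary_parts, actions) is the state
def pvBodyA (st : PySem.Set String × PySem.Set String) (d : List (String × String)) :
    PySem.Set String × PySem.Set String :=
  let reason := PySem.Dict.getD (PySem.Dict.mk d) "reason" ""   -- d["reason"]; KeyError excluded by Pre_
  if PySem.Str.isIn "근저당권" reason && PySem.Str.isIn "초과" reason then
    (PySem.Set.add st.1 "1순위로 설정된 근저당권의 채권최고액이 보증금을 초과합니다. 이는 경매 시 보증금이 전액 회수되지 않을 가능성을 의미합니다.",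
     PySem.Set.update st.2 ["보증보험 가입 가능 여부 확인", "등기부등본상 채권최고액 및 설정 순위 확인"])
  else if PySem.Str.isIn "가압류" reason then
    (PySem.Set.add st.1 "두 건 이상의 가압류가 발견되어 채권자 간 우선순위 경합이 예상되며, 이는 보증금 회수에 불리하게 작용할 수 있습니다.",
     PySem.Set.update st.2 ["가압류 채권자 목록 확인", "가압류 해제 가능성 및 말소 여부 확인"])
  else if PySem.Str.isIn "압류" reason then
    (PySem.Set.add st.1 "압류가 등기되어 있으며 말소되지 않았습니다. 이는 세금 체납 또는 법적 분쟁과 연관되어 있을 수 있습니다.",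
     PySem.Set.add st.2 "채권자와 협의 및 압류 해제 요청 가능 여부 검토")
  else if PySem.Str.isIn "소유권이전" reason then
    (PySem.Set.add st.1 "최근 2년 이내에 소유권이 이전되었습니다. 이는 투자 목적 매도 또는 명의 신뢰도 저하 요인일 수 있습니다.",
     PySem.Set.add st.2 "이전 소유자와의 관계 및 명의 변동 사유 확인")
  else if PySem.Str.isIn "불일치" reason then
    (PySem.Set.add st.1 "입력한 임대인 정보와 등기부등본에 기재된 실제 소유자가 일치하지 않습니다. 대리인 계약일 경우 위임장 확인이 필요합니다.",
     PySem.Set.add st.2 "계약 상대방의 실소유자 여부 확인")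
  else if PySem.Str.isIn "계약일" reason && PySem.Str.isIn "이후" reason then
    (PySem.Set.add st.1 "계약일 이후에 추가된 권리가 발견되어, 선순위 권리로 인해 보증금 보호가 어려울 수 있습니다.",
     PySem.Set.add st.2 "계약 체결일과 등기 날짜 비교 검토")
  else if PySem.Str.isIn "공동담보" reason then
    (PySem.Set.add st.1 "본 부동산은 다른 채무의 담보로도 활용되고 있어, 경매 시 채권자 분배 우선순위에서 밀릴 수 있습니다.",
     PySem.Set.add st.2 "공동담보 부동산 전체 목록과 채권 범위 확인")
  else if PySem.Str.isIn "장기 미말소" reason then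
    (PySem.Set.add st.1 "10년 이상 된 권리가 말소되지 않고 남아 있어 등기 정보의 최신성이 떨어질 수 있습니다.",
     PySem.Set.add st.2 "등기부 권리 말소청구 가능 여부 확인")
  else if PySem.Str.isIn "지상권" reason then
    (PySem.Set.add st.1 "지상권이 설정된 부동산은 사용·수익에 제한이 있어 거주나 재임대에 제약이 있을 수 있습니다.",
     PySem.Set.add st.2 "지상권 설정 범위 및 존속기간 확인")
  else if PySem.Str.isIn "경매" reason then
    (PySem.Set.add st.1 "해당 부동산은 과거 경매 절차가 개시된 이력이 있어, 권리관계에 대한 면밀한 검토가 필요합니다.",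
     PySem.Set.add st.2 "과거 경매 사유 및 낙찰 여부 확인")
  else
    (PySem.Set.add st.1 reason, PySem.Set.add st.2 "상세 내용 확인 필요")

def generate_summary_and_actions (deductions : List (List (String × String))) (warnings : List String) : String × List String × List String :=
  if deductions.isEmpty then
    ("등기부등본 분석 결과, 특이 위험 요인은 발견되지 않았습니다.",
     PySem.Set.add PySem.Set.empty "등기부등본의 변동 여부를 주기적으로 확인하세요.",
     warnings)
  else
    let st := deductions.foldl pvBodyA (PySem.Set.empty, PySem.Set.empty)
    let summary_text := ""
    let summary_text :=
      if warnings.isEmpty then summary_text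
      else summary_text ++ (("⚠️[주의] 아래 항목은 입력 정보가 없어 분석에서 제외되었습니다:\n" ++ PySem.Str.join "\n" warnings) ++ "\n\n")
    let summary_text :=
      if st.1.isEmpty then summary_text
      else (summary_text ++ "[위험 요인]\n") ++
        PySem.Str.join "\n" ((PySem.List.sorted st.1 (fun s => s) false).map (fun s => "• " ++ s))
    (summary_text, PySem.List.sorted st.2 (fun s => s) false, warnings)

-- ===== PORT B =====
-- the rule table _RULES: (predicate on the reason, summary sentence, action list)
def pvRules : List ((String → Bool) × String × List String) :=
  [ (fun r => PySem.Str.isIn "근저당권" r && PySem.Str.isIn "초과" r,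
     "1순위로 설정된 근저당권의 채권최고액이 보증금을 초과합니다. 이는 경매 시 보증금이 전액 회수되지 않을 가능성을 의미합니다.",
     ["보증보험 가입 가능 여부 확인", "등기부등본상 채권최고액 및 설정 순위 확인"]),
    (fun r => PySem.Str.isIn "가압류" r,
     "두 건 이상의 가압류가 발견되어 채권자 간 우선순위 경합이 예상되며, 이는 보증금 회수에 불리하게 작용할 수 있습니다.",
     ["가압류 채권자 목록 확인", "가압류 해제 가능성 및 말소 여부 확인"]),
    (fun r => PySem.Str.isIn "압류" r,
     "압류가 등기되어 있으며 말소되지 않았습니다. 이는 세금 체납 또는 법적 분쟁과 연관되어 있을 수 있습니다.",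
     ["채권자와 협의 및 압류 해제 요청 가능 여부 검토"]),
    (fun r => PySem.Str.isIn "소유권이전" r,
     "최근 2년 이내에 소유권이 이전되었습니다. 이는 투자 목적 매도 또는 명의 신뢰도 저하 요인일 수 있습니다.",
     ["이전 소유자와의 관계 및 명의 변동 사유 확인"]),
    (fun r => PySem.Str.isIn "불일치" r,
     "입력한 임대인 정보와 등기부등본에 기재된 실제 소유자가 일치하지 않습니다. 대리인 계약일 경우 위임장 확인이 필요합니다.",
     ["계약 상대방의 실소유자 여부 확인"]),
    (fun r => PySem.Str.isIn "계약일" r && PySem.Str.isIn "이후" r,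
     "계약일 이후에 추가된 권리가 발견되어, 선순위 권리로 인해 보증금 보호가 어려울 수 있습니다.",
     ["계약 체결일과 등기 날짜 비교 검토"]),
    (fun r => PySem.Str.isIn "공동담보" r,
     "본 부동산은 다른 채무의 담보로도 활용되고 있어, 경매 시 채권자 분배 우선순위에서 밀릴 수 있습니다.",
     ["공동담보 부동산 전체 목록과 채권 범위 확인"]),
    (fun r => PySem.Str.isIn "장기 미말소" r,
     "10년 이상 된 권리가 말소되지 않고 남아 있어 등기 정보의 최신성이 떨어질 수 있습니다.",
     ["등기부 권리 말소청구 가능 여부 확인"]),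
    (fun r => PySem.Str.isIn "지상권" r,
     "지상권이 설정된 부동산은 사용·수익에 제한이 있어 거주나 재임대에 제약이 있을 수 있습니다.",
     ["지상권 설정 범위 및 존속기간 확인"]),
    (fun r => PySem.Str.isIn "경매" r,
     "해당 부동산은 과거 경매 절차가 개시된 이력이 있어, 권리관계에 대한 면밀한 검토가 필요합니다.",
     ["과거 경매 사유 및 낙찰 여부 확인"]) ]

-- one trip of B's rule loop: state = ((parts, actions), remaining reasons)
def pvSieveStep (st : (PySem.Set String × PySem.Set String) × List String)
    (rule : (String → Bool) × String × List String) :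
    (PySem.Set String × PySem.Set String) × List String :=
  let matched := st.2.filter rule.1
  let sets := if matched.isEmpty then st.1
              else (PySem.Set.add st.1.1 rule.2.1, PySem.Set.update st.1.2 rule.2.2)
  (sets, st.2.filter (fun r => !rule.1 r))

def generate_summary_and_actions_alt (deductions : List (List (String × String))) (warnings : List String) : String × List String × List String :=
  if deductions.isEmpty then
    ("등기부등본 분석 결과, 특이 위험 요인은 발견되지 않았습니다.",
     ["등기부등본의 변동 여부를 주기적으로 확인하세요."],
     warnings)
  else
    let remaining := deductions.map (fun d => PySem.Dict.getD (PySem.Dict.mk d) "reason" "")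
    let st := pvRules.foldl pvSieveStep ((PySem.Set.empty, PySem.Set.empty), remaining)
    let fin := st.2.foldl
      (fun p r => (PySem.Set.add p.1 r, PySem.Set.add p.2 "상세 내용 확인 필요")) st.1
    let header :=
      if warnings.isEmpty then ""
      else ("⚠️[주의] 아래 항목은 입력 정보가 없어 분석에서 제외되었습니다:\n" ++ PySem.Str.join "\n" warnings) ++ "\n\n"
    ((header ++ "[위험 요인]\n") ++
       PySem.Str.join "\n" ((PySem.List.sorted fin.1 (fun s => s) false).map (fun s => "• " ++ s)),
     PySem.List.sorted fin.2 (fun s => s) false, warnings)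

-- ===== PRECONDITION & SPEC =====
-- Pre_ excludes exactly the deduction dicts with no "reason" key, on which Python A raises KeyError (so does B).
def Pre_generate_summary_and_actions (deductions : List (List (String × String))) (warnings : List String) : Prop :=
  ∀ d ∈ deductions, "reason" ∈ d.map Prod.fst

instance (deductions : List (List (String × String))) (warnings : List String) : Decidable (Pre_generate_summary_and_actions deductions warnings) := by unfold Pre_generate_summary_and_actions; infer_instance

def pvWitness_generate_summary_and_actions : (List (List (String × String))) × List String :=
  ([[("reason", "mortgage")], [("reason", "unknown issue")]], ["no contract date"])

def Spec_generate_summary_and_actions (deductions : List (List (String × String))) (warnings : List String) (out : String × List String × List String) : Prop := out = generate_summary_and_actions_alt deductions warnings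
instance (deductions : List (List (String × String))) (warnings : List String) (out : String × List String × List String) : Decidable (Spec_generate_summary_and_actions deductions warnings out) := by unfold Spec_generate_summary_and_actions; infer_instance

-- ===== CLAIM (what is proved, stated in full; the proofs are below) =====
def Claim_equal_generate_summary_and_actions : Prop := ∀ (deductions : List (List (String × String))) (warnings : List String), Dom_generate_summary_and_actions deductions warnings → Pre_generate_summary_and_actions deductions warnings → Spec_generate_summary_and_actions deductions warnings (generate_summary_and_actions deductions warnings)

-- ===== LEMMAS AND PROOFS =====

-- proof-only: first-match classification of one reason by a rule list (the semantics of A's elif chain)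
def pvCls : List ((String → Bool) × String × List String) → String → String × List String
  | [], r => (r, ["상세 내용 확인 필요"])
  | u :: t, r => if u.1 r then u.2 else pvCls t r

-- A's elif chain on one deduction adds the first-match sentence and actions
set_option maxHeartbeats 1000000 in
theorem pvBodyA_eq (st : PySem.Set String × PySem.Set String) (d : List (String × String)) :
    pvBodyA st d =
      (PySem.Set.add st.1 (pvCls pvRules (PySem.Dict.getD (PySem.Dict.mk d) "reason" "")).1,
       PySem.Set.update st.2 (pvCls pvRules (PySem.Dict.getD (PySem.Dict.mk d) "reason" "")).2) := by
  simp only [pvBodyA, pvRules, pvCls, PySem.Set.update, List.foldl_cons, List.foldl_nil]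
  by_cases h1 : (PySem.Str.isIn "근저당권" (PySem.Dict.getD (PySem.Dict.mk d) "reason" "") && PySem.Str.isIn "초과" (PySem.Dict.getD (PySem.Dict.mk d) "reason" "")) = true
  · rw [if_pos h1, if_pos h1]; rfl
  · rw [if_neg h1, if_neg h1]
    by_cases h2 : PySem.Str.isIn "가압류" (PySem.Dict.getD (PySem.Dict.mk d) "reason" "") = true
    · rw [if_pos h2, if_pos h2]; rfl
    · rw [if_neg h2, if_neg h2]
      by_cases h3 : PySem.Str.isIn "압류" (PySem.Dict.getD (PySem.Dict.mk d) "reason" "") = true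
      · rw [if_pos h3, if_pos h3]; rfl
      · rw [if_neg h3, if_neg h3]
        by_cases h4 : PySem.Str.isIn "소유권이전" (PySem.Dict.getD (PySem.Dict.mk d) "reason" "") = true
        · rw [if_pos h4, if_pos h4]; rfl
        · rw [if_neg h4, if_neg h4]
          by_cases h5 : PySem.Str.isIn "불일치" (PySem.Dict.getD (PySem.Dict.mk d) "reason" "") = true
          · rw [if_pos h5, if_pos h5]; rfl
          · rw [if_neg h5, if_neg h5]
            by_cases h6 : (PySem.Str.isIn "계약일" (PySem.Dict.getD (PySem.Dict.mk d) "reason" "") && PySem.Str.isIn "이후" (PySem.Dict.getD (PySem.Dict.mk d) "reason" "")) = true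
            · rw [if_pos h6, if_pos h6]; rfl
            · rw [if_neg h6, if_neg h6]
              by_cases h7 : PySem.Str.isIn "공동담보" (PySem.Dict.getD (PySem.Dict.mk d) "reason" "") = true
              · rw [if_pos h7, if_pos h7]; rfl
              · rw [if_neg h7, if_neg h7]
                by_cases h8 : PySem.Str.isIn "장기 미말소" (PySem.Dict.getD (PySem.Dict.mk d) "reason" "") = true
                · rw [if_pos h8, if_pos h8]; rfl
                · rw [if_neg h8, if_neg h8]
                  by_cases h9 : PySem.Str.isIn "지상권" (PySem.Dict.getD (PySem.Dict.mk d) "reason" "") = true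
                  · rw [if_pos h9, if_pos h9]; rfl
                  · rw [if_neg h9, if_neg h9]
                    by_cases h10 : PySem.Str.isIn "경매" (PySem.Dict.getD (PySem.Dict.mk d) "reason" "") = true
                    · rw [if_pos h10, if_pos h10]; rfl
                    · rw [if_neg h10, if_neg h10]
                      rfl

-- A's accumulation loop, characterised
theorem pvFoldA (l : List (List (String × String))) (P A : PySem.Set String) :
    l.foldl pvBodyA (P, A) =
      (PySem.Set.update P (l.map (fun d => (pvCls pvRules (PySem.Dict.getD (PySem.Dict.mk d) "reason" "")).1)),
       PySem.Set.update A (l.flatMap (fun d => (pvCls pvRules (PySem.Dict.getD (PySem.Dict.mk d) "reason" "")).2))) := by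
  induction l generalizing P A with
  | nil => simp [PySem.Set.update]
  | cons d t ih =>
      simp only [List.foldl_cons, pvBodyA_eq, ih, List.map_cons, List.flatMap_cons,
        PySem.Set.update, List.foldl_cons, List.foldl_append]

-- B's whole sieve (rule loop followed by the leftover loop), as one function for the lemmas
def pvRun (rs : List ((String → Bool) × String × List String)) (L : List String)
    (PA : PySem.Set String × PySem.Set String) : PySem.Set String × PySem.Set String :=
  let st := rs.foldl pvSieveStep (PA, L)
  st.2.foldl (fun p r => (PySem.Set.add p.1 r, PySem.Set.add p.2 "상세 내용 확인 필요")) st.1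

theorem pvRemFold (L : List String) (PA : PySem.Set String × PySem.Set String) :
    L.foldl (fun p r => (PySem.Set.add p.1 r, PySem.Set.add p.2 "상세 내용 확인 필요")) PA
      = (PySem.Set.update PA.1 L, PySem.Set.update PA.2 (L.map (fun _ => "상세 내용 확인 필요"))) := by
  induction L generalizing PA with
  | nil => simp [PySem.Set.update]
  | cons h t ih => simp [List.foldl_cons, ih, PySem.Set.update]

theorem pvRun_cons (u : (String → Bool) × String × List String)
    (t : List ((String → Bool) × String × List String)) (L : List String)
    (PA : PySem.Set String × PySem.Set String) :
    pvRun (u :: t) L PA =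
      pvRun t (L.filter (fun r => !u.1 r))
        (if (L.filter u.1).isEmpty then PA
         else (PySem.Set.add PA.1 u.2.1, PySem.Set.update PA.2 u.2.2)) := by
  simp only [pvRun, List.foldl_cons, pvSieveStep]

theorem pvNeNil {α : Type} (L : List α) : (¬ L = []) ↔ ∃ x, x ∈ L := by
  cases L <;> simp

theorem pvRun_mem (rs : List ((String → Bool) × String × List String)) (L : List String)
    (PA : PySem.Set String × PySem.Set String) :
    (∀ s, s ∈ (pvRun rs L PA).1 ↔ s ∈ PA.1 ∨ ∃ r ∈ L, (pvCls rs r).1 = s) ∧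
    (∀ a, a ∈ (pvRun rs L PA).2 ↔ a ∈ PA.2 ∨ ∃ r ∈ L, a ∈ (pvCls rs r).2) := by
  induction rs generalizing L PA with
  | nil =>
      simp only [pvRun, List.foldl_nil, pvRemFold]
      constructor <;> intro x <;>
        simp [pvCls, PySem.Set.mem_update, eq_comm, pvNeNil]
  | cons u t ih =>
      rw [pvRun_cons]
      by_cases hm : (L.filter u.1).isEmpty
      · have hfalse : ∀ r ∈ L, u.1 r = false := by
          intro r hr
          by_contra hc
          have : r ∈ L.filter u.1 := List.mem_filter.mpr ⟨hr, by simpa using hc⟩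
          rw [List.isEmpty_iff.mp hm] at this
          simp at this
        have hkeep : L.filter (fun r => !u.1 r) = L :=
          List.filter_eq_self.mpr (by intro r hr; simp [hfalse r hr])
        rw [if_pos hm, hkeep]
        obtain ⟨ih1, ih2⟩ := ih L PA
        constructor <;> intro x
        · rw [ih1]
          constructor <;> rintro (h | ⟨r, hr, h⟩)
          · exact Or.inl h
          · exact Or.inr ⟨r, hr, by simp [pvCls, hfalse r hr] at h ⊢; exact h⟩
          · exact Or.inl h
          · exact Or.inr ⟨r, hr, by simp [pvCls, hfalse r hr] at h ⊢; exact h⟩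
        · rw [ih2]
          constructor <;> rintro (h | ⟨r, hr, h⟩)
          · exact Or.inl h
          · exact Or.inr ⟨r, hr, by simp [pvCls, hfalse r hr] at h ⊢; exact h⟩
          · exact Or.inl h
          · exact Or.inr ⟨r, hr, by simp [pvCls, hfalse r hr] at h ⊢; exact h⟩
      · obtain ⟨r0, hr0L, hr0⟩ : ∃ r ∈ L, u.1 r = true := by simpa using hm
        rw [if_neg hm]
        obtain ⟨ih1, ih2⟩ := ih (L.filter (fun r => !u.1 r))
          (PySem.Set.add PA.1 u.2.1, PySem.Set.update PA.2 u.2.2)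
        constructor <;> intro x
        · rw [ih1]
          simp only [PySem.Set.mem_add, List.mem_filter, Bool.not_eq_eq_eq_not, Bool.not_true]
          constructor
          · rintro ((h | h) | ⟨r, ⟨hr, hur⟩, h⟩)
            · exact Or.inl h
            · exact Or.inr ⟨r0, hr0L, by simp [pvCls, hr0, h]⟩
            · exact Or.inr ⟨r, hr, by simpa [pvCls, hur] using h⟩
          · rintro (h | ⟨r, hr, h⟩)
            · exact Or.inl (Or.inl h)
            · by_cases hur : u.1 r = true
              · simp [pvCls, hur] at h; exact Or.inl (Or.inr h.symm)
              · exact Or.inr ⟨r, ⟨hr, by simpa using hur⟩,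
                  by simpa [pvCls, hur] using h⟩
        · rw [ih2]
          simp only [PySem.Set.mem_update, List.mem_filter, Bool.not_eq_eq_eq_not, Bool.not_true]
          constructor
          · rintro ((h | h) | ⟨r, ⟨hr, hur⟩, h⟩)
            · exact Or.inl h
            · exact Or.inr ⟨r0, hr0L, by simp [pvCls, hr0]; exact h⟩
            · exact Or.inr ⟨r, hr, by simpa [pvCls, hur] using h⟩
          · rintro (h | ⟨r, hr, h⟩)
            · exact Or.inl (Or.inl h)
            · by_cases hur : u.1 r = true
              · simp [pvCls, hur] at h; exact Or.inl (Or.inr h)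
              · exact Or.inr ⟨r, ⟨hr, by simpa using hur⟩,
                  by simpa [pvCls, hur] using h⟩

theorem pvRun_nodup (rs : List ((String → Bool) × String × List String)) (L : List String)
    (PA : PySem.Set String × PySem.Set String) (h1 : PA.1.Nodup) (h2 : PA.2.Nodup) :
    (pvRun rs L PA).1.Nodup ∧ (pvRun rs L PA).2.Nodup := by
  induction rs generalizing L PA with
  | nil =>
      rw [pvRun, List.foldl_nil, pvRemFold]
      exact ⟨PySem.Set.nodup_update _ _ h1, PySem.Set.nodup_update _ _ h2⟩
  | cons u t ih =>
      rw [pvRun_cons]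
      by_cases hm : (L.filter u.1).isEmpty
      · rw [if_pos hm]; exact ih _ _ h1 h2
      · rw [if_neg hm]
        exact ih _ _ (PySem.Set.nodup_add _ _ h1) (PySem.Set.nodup_update _ _ h2)

-- ===== VERDICT (by name: the statement is the Claim_ definition above) =====
theorem generate_summary_and_actions_spec : Claim_equal_generate_summary_and_actions := by
  intro deductions warnings _hdom _hpre
  unfold Spec_generate_summary_and_actions
  unfold generate_summary_and_actions generate_summary_and_actions_alt
  by_cases hd : deductions.isEmpty
  · simp [hd, PySem.Set.add, PySem.Set.empty]
  · simp only [hd, if_neg, Bool.false_eq_true, not_false_iff]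
    rw [pvFoldA]
    set reasons := deductions.map (fun d => PySem.Dict.getD (PySem.Dict.mk d) "reason" "") with hreasons
    have hrun : (pvRules.foldl pvSieveStep ((PySem.Set.empty, PySem.Set.empty), reasons)).2.foldl
        (fun p r => (PySem.Set.add p.1 r, PySem.Set.add p.2 "상세 내용 확인 필요"))
        (pvRules.foldl pvSieveStep ((PySem.Set.empty, PySem.Set.empty), reasons)).1
        = pvRun pvRules reasons (PySem.Set.empty, PySem.Set.empty) := rfl
    have hofP : PySem.Set.update (PySem.Set.empty : PySem.Set String)
        (deductions.map (fun d => (pvCls pvRules (PySem.Dict.getD (PySem.Dict.mk d) "reason" "")).1))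
        = PySem.Set.ofList (reasons.map (fun r => (pvCls pvRules r).1)) := by
      rw [hreasons, List.map_map, PySem.Set.ofList_eq_foldl]; rfl
    have hofA : PySem.Set.update (PySem.Set.empty : PySem.Set String)
        (deductions.flatMap (fun d => (pvCls pvRules (PySem.Dict.getD (PySem.Dict.mk d) "reason" "")).2))
        = PySem.Set.ofList (reasons.flatMap (fun r => (pvCls pvRules r).2)) := by
      rw [hreasons, List.flatMap_map, PySem.Set.ofList_eq_foldl]; rfl
    obtain ⟨hnd1, hnd2⟩ := pvRun_nodup pvRules reasons (PySem.Set.empty, PySem.Set.empty)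
      List.nodup_nil List.nodup_nil
    obtain ⟨hm1, hm2⟩ := pvRun_mem pvRules reasons (PySem.Set.empty, PySem.Set.empty)
    -- the two parts sets are permutations, hence sort equal; same for actions
    have hpermP : (pvRun pvRules reasons (PySem.Set.empty, PySem.Set.empty)).1.Perm
        (PySem.Set.ofList (reasons.map (fun r => (pvCls pvRules r).1))) := by
      rw [List.perm_ext_iff_of_nodup hnd1 (PySem.Set.nodup_ofList _)]
      intro s
      rw [hm1 s, PySem.Set.mem_ofList, List.mem_map]
      simp [PySem.Set.empty]
    have hpermA : (pvRun pvRules reasons (PySem.Set.empty, PySem.Set.empty)).2.Perm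
        (PySem.Set.ofList (reasons.flatMap (fun r => (pvCls pvRules r).2))) := by
      rw [List.perm_ext_iff_of_nodup hnd2 (PySem.Set.nodup_ofList _)]
      intro a
      rw [hm2 a, PySem.Set.mem_ofList, List.mem_flatMap]
      simp [PySem.Set.empty]
    have hsortP : PySem.List.sorted (pvRun pvRules reasons (PySem.Set.empty, PySem.Set.empty)).1 (fun s => s) false
        = PySem.List.sorted (PySem.Set.ofList (reasons.map (fun r => (pvCls pvRules r).1))) (fun s => s) false :=
      PySem.List.sorted_eq_sorted_of_perm _ _ _ (fun _ _ h => h) hpermP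
    have hsortA : PySem.List.sorted (pvRun pvRules reasons (PySem.Set.empty, PySem.Set.empty)).2 (fun s => s) false
        = PySem.List.sorted (PySem.Set.ofList (reasons.flatMap (fun r => (pvCls pvRules r).2))) (fun s => s) false :=
      PySem.List.sorted_eq_sorted_of_perm _ _ _ (fun _ _ h => h) hpermA
    -- A's summary_parts set is nonempty
    obtain ⟨d0, t0, rfl⟩ : ∃ d0 t0, deductions = d0 :: t0 := by
      cases deductions with
      | nil => simp at hd
      | cons a b => exact ⟨a, b, rfl⟩
    have hie : (PySem.Set.ofList (reasons.map (fun r => (pvCls pvRules r).1))).isEmpty = false := by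
      cases hcase : (PySem.Set.ofList (reasons.map (fun r => (pvCls pvRules r).1))).isEmpty
      · rfl
      exfalso
      have h := List.isEmpty_iff.mp hcase
      have := (PySem.Set.mem_ofList (reasons.map (fun r => (pvCls pvRules r).1))
        ((pvCls pvRules (PySem.Dict.getD (PySem.Dict.mk d0) "reason" "")).1)).mpr
        (by simp [hreasons])
      rw [h] at this
      simp at this
    simp only [hrun, hofP, hofA, hsortP, hsortA, hie, Bool.false_eq_true, ite_false]
    by_cases hw : warnings.isEmpty <;> simp [hw]
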